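-- pv_equiv track=rewrite | github.com/tuantran1305/ClassIoT | project_py_HieuMai/testpy.py | even_list
-- ===== SOURCE A (Python) =====
-- def even_list(array, even_array):
--     k = 0
--     for i in array:
--         if (i % 2 == 0):
--             if i not in even_array[:k]:
--                 even_array[k] = i
--                 k = k + 1
--     return even_array[:k]
-- ===== SOURCE B (Python) =====
-- def even_list(array, even_array):
--     # Distinct evens by repeated head-extraction: pop the first even, erase all
--     # of its later duplicates from the worklist, repeat.  Never tests a candidate
--     # against what was already emitted.  Return value only: does not mutate even_array.
--     xs = [i for i in array if i % 2 == 0]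
--     out = []
--     while xs:
--         head = xs[0]
--         out.append(head)
--         xs = [x for x in xs[1:] if x != head]
--     return out
-- ===== Notes on version B (the rewrite author's own statement) =====
-- stated objective: alternative
-- what changed: A filters and deduplicates in one fused loop that checks each even against the prefix of even_array it has written so far and mutates even_array in place; B instead works forward on a worklist: it pops the first remaining even, emits it, and erases all of its later duplicates from the worklist, so no membership test against the emitted output ever happens and even_array is never written.
import Mathlib
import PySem

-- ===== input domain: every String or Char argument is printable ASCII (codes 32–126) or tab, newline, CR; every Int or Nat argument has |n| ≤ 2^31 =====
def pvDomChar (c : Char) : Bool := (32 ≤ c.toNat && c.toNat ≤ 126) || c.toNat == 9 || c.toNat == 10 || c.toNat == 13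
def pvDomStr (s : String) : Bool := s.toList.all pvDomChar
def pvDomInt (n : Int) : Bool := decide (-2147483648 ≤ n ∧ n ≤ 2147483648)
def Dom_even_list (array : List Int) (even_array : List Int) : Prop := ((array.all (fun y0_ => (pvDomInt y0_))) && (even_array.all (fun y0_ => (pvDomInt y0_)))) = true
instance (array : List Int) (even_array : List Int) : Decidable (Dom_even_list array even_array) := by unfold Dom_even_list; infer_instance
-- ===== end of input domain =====

-- B replaces A's fused filter+membership+write loop by a worklist algorithm (pop the first even,
-- erase its later duplicates, repeat); A mutates even_array in place, B does not — the equivalence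
-- proved here is about the RETURN value only.


-- ===== PORT A =====
-- one loop step of A: i even → if i not in even_array[:k] then even_array[k] = i; k += 1
def evenListStepA (s : List Int × Int) (i : Int) : List Int × Int :=
  if PySem.Int.mod i 2 == 0 then
    if !(PySem.List.slice s.1 none (some s.2)).contains i then
      (PySem.List.pySetD s.1 s.2 i, s.2 + 1)   -- pySetD exact under Pre_ (index always in range there)
    else s
  else s

def even_list (array : List Int) (even_array : List Int) : List Int :=
  let r := array.foldl evenListStepA (even_array, 0)
  PySem.List.slice r.1 none (some r.2)

-- ===== PORT B =====
-- B's while loop: pop the head of the worklist, append it to out, erase its duplicates from the rest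
def evenListAltLoop (xs : List Int) (out : List Int) : List Int :=
  match xs with
  | [] => out
  | head :: t => evenListAltLoop (t.filter (fun x => x ≠ head)) (out ++ [head])
termination_by xs.length
decreasing_by
  have h := List.length_filter_le (fun x : {x // x ∈ t} => !decide (↑x = head)) t.attach
  simp at h ⊢
  omega

def even_list_alt (array : List Int) (even_array : List Int) : List Int :=
  evenListAltLoop (array.filter (fun i => PySem.Int.mod i 2 == 0)) []

-- ===== PRECONDITION & SPEC =====
-- A raises IndexError when the distinct evens of `array` outnumber even_array's slots; exactly those inputs are excluded.
def Pre_even_list (array : List Int) (even_array : List Int) : Prop :=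
  (PySem.List.dedup (array.filter (fun i => PySem.Int.mod i 2 == 0))).length ≤ even_array.length
instance (array : List Int) (even_array : List Int) : Decidable (Pre_even_list array even_array) := by unfold Pre_even_list; infer_instance

def pvWitness_even_list : List Int × List Int := ([4, 3, 4, 2], [0, 0, 0])

def Spec_even_list (array : List Int) (even_array : List Int) (out : List Int) : Prop := out = even_list_alt array even_array
instance (array : List Int) (even_array : List Int) (out : List Int) : Decidable (Spec_even_list array even_array out) := by unfold Spec_even_list; infer_instance

-- ===== CLAIM (what is proved, stated in full; the proofs are below) =====
def Claim_equal_even_list : Prop := ∀ (array : List Int) (even_array : List Int), Dom_even_list array even_array → Pre_even_list array even_array → Spec_even_list array even_array (even_list array even_array)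

-- ===== LEMMAS AND PROOFS =====

-- the seen-list dedup step A effectively performs, with A's evenness test fused in
def evenListStepB (s : List Int) (i : Int) : List Int :=
  if PySem.Int.mod i 2 == 0 then (if s.contains i then s else s ++ [i]) else s

theorem evenListStepB_length_le (array : List Int) :
    ∀ s : List Int, s.length ≤ (array.foldl evenListStepB s).length := by
  induction array with
  | nil => intro s; simp
  | cons i rest ih =>
    intro s
    refine le_trans ?_ (ih (evenListStepB s i))
    unfold evenListStepB
    split_ifs <;> simp

-- loop invariant: A's state is (ea, k) with even_array[:k] = the seen-list of the dedup fold
theorem take_succ_set (ea : List Int) (k : Nat) (i : Int) (h : k < ea.length) :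
    (ea.set k i).take (k + 1) = ea.take k ++ [i] := by
  rw [List.set_eq_take_append_cons_drop, if_pos h, List.take_append]
  simp [Nat.min_eq_left (le_of_lt h), List.length_take]

theorem even_list_loop (array : List Int) :
    ∀ (ea : List Int) (k : Nat), k ≤ ea.length →
    (array.foldl evenListStepB (ea.take k)).length ≤ ea.length →
    PySem.List.slice (array.foldl evenListStepA (ea, (k : Int))).1 none
        (some (array.foldl evenListStepA (ea, (k : Int))).2)
      = array.foldl evenListStepB (ea.take k) := by
  induction array with
  | nil =>
    intro ea k hk _
    simpa using PySem.List.slice_to_natCast ea k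
  | cons i rest ih =>
    intro ea k hk hcap
    simp only [List.foldl_cons] at hcap ⊢
    by_cases hev : (2 : Int) ∣ i
    · by_cases hmem : i ∈ ea.take k
      · have hA : evenListStepA (ea, (k : Int)) i = (ea, (k : Int)) := by
          unfold evenListStepA
          rw [PySem.List.slice_to_natCast ea k]
          simp [hev, hmem]
        have hB : evenListStepB (ea.take k) i = ea.take k := by
          unfold evenListStepB; simp [hev, hmem]
        rw [hA, hB]; rw [hB] at hcap
        exact ih ea k hk hcap
      · have hB : evenListStepB (ea.take k) i = ea.take k ++ [i] := by
          unfold evenListStepB; simp [hev, hmem]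
        rw [hB] at hcap ⊢
        have hlen : k < ea.length := by
          have h1 := evenListStepB_length_le rest (ea.take k ++ [i])
          have h2 : (ea.take k ++ [i]).length = k + 1 := by
            simp [List.length_take, Nat.min_eq_left hk]
          omega
        have hA : evenListStepA (ea, (k : Int)) i = (ea.set k i, ((k + 1 : Nat) : Int)) := by
          unfold evenListStepA
          rw [PySem.List.slice_to_natCast ea k]
          simp [hev, hmem, PySem.List.pySetD_natCast]
        rw [hA]
        have htake := take_succ_set ea k i hlen
        rw [← htake] at hcap ⊢
        exact ih (ea.set k i) (k + 1) (by simpa using hlen)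
          (by simpa using hcap)
    · have hA : evenListStepA (ea, (k : Int)) i = (ea, (k : Int)) := by
        unfold evenListStepA; simp [hev]
      have hB : evenListStepB (ea.take k) i = ea.take k := by
        unfold evenListStepB; simp [hev]
      rw [hA, hB]; rw [hB] at hcap
      exact ih ea k hk hcap

-- the worklist algorithm equals the seen-list dedup fold
theorem altLoop_nil (out : List Int) : evenListAltLoop [] out = out := by
  rw [evenListAltLoop]

theorem altLoop_cons (h : Int) (t out : List Int) :
    evenListAltLoop (h :: t) out
      = evenListAltLoop (t.filter (fun x => x ≠ h)) (out ++ [h]) := by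
  rw [evenListAltLoop]

theorem altLoop_eq_foldl (xs : List Int) :
    ∀ acc : List Int,
      evenListAltLoop (xs.filter (fun x => !(acc.contains x))) acc
        = xs.foldl (fun s i => if s.contains i then s else s ++ [i]) acc := by
  induction xs with
  | nil => intro acc; simpa using altLoop_nil acc
  | cons i t ih =>
    intro acc
    by_cases hmem : i ∈ acc
    · have h1 : (i :: t).filter (fun x => !(acc.contains x))
          = t.filter (fun x => !(acc.contains x)) := by
        simp [List.filter_cons, hmem]
      have h2 : (i :: t).foldl (fun s i => if s.contains i then s else s ++ [i]) acc
          = t.foldl (fun s i => if s.contains i then s else s ++ [i]) acc := by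
        simp [hmem]
      rw [h1, h2]
      exact ih acc
    · have hfuse : (t.filter (fun x => !(acc.contains x))).filter (fun x => x ≠ i)
          = t.filter (fun x => !((acc ++ [i]).contains x)) := by
        rw [List.filter_filter]
        refine List.filter_congr ?_
        intro x _
        by_cases hx : x = i <;> simp [hx]
      have h1 : (i :: t).filter (fun x => !(acc.contains x))
          = i :: t.filter (fun x => !(acc.contains x)) := by
        simp [List.filter_cons, hmem]
      have h2 : (i :: t).foldl (fun s i => if s.contains i then s else s ++ [i]) acc
          = t.foldl (fun s i => if s.contains i then s else s ++ [i]) (acc ++ [i]) := by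
        simp [hmem]
      rw [h1, altLoop_cons, hfuse, ih (acc ++ [i]), h2]

-- ===== VERDICT (by name: the statement is the Claim_ definition above) =====
theorem even_list_spec : Claim_equal_even_list := by
  intro array ea _ hpre
  unfold Spec_even_list even_list even_list_alt
  have hfuse : PySem.List.dedup (array.filter (fun i => PySem.Int.mod i 2 == 0))
      = array.foldl evenListStepB [] := by
    unfold PySem.List.dedup PySem.Set.ofList
    rw [List.foldl_filter]
    rfl
  have halt : evenListAltLoop (array.filter (fun i => PySem.Int.mod i 2 == 0)) []
      = array.foldl evenListStepB [] := by
    have := altLoop_eq_foldl (array.filter (fun i => PySem.Int.mod i 2 == 0)) []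
    simp only [List.contains_nil, Bool.not_false, List.filter_true] at this
    rw [this, List.foldl_filter]
    rfl
  unfold Pre_even_list at hpre
  rw [hfuse] at hpre
  rw [halt]
  have := even_list_loop array ea 0 (by omega) (by simpa using hpre)
  simpa using this
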